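-- pv_equiv track=rewrite | github.com/peterxcli/remote-c | topc/2024/pI.py | reconstruct_array
-- ===== SOURCE A (Python) =====
-- from typing import List, Tuple
-- from collections import defaultdict
--
-- def reconstruct_array(n: int, b: List[int]) -> Tuple[bool, List[int]]:
--     dp = defaultdict(lambda: defaultdict(list))
--
--     for a1 in range(1, 101):
--         if any(a1 * a2 == b[0] for a2 in range(1, 101)):
--             dp[1 << 0][a1] = [a1]
--
--     for mask in range(1, 1 << (n - 1)):
--         for last in range(1, 101):
--             if dp[mask][last]:
--                 for i in range(n - 1):
--                     if not (mask & (1 << i)):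
--                         for next_val in range(1, 101):
--                             if last * next_val == b[i]:
--                                 new_mask = mask | (1 << i)
--                                 dp[new_mask][next_val] = dp[mask][last] + [next_val]
--
--     for last in range(1, 101):
--         if dp[(1 << (n - 1)) - 1][last]:
--             return True, dp[(1 << (n - 1)) - 1][last]
--
--     return False, []
-- ===== SOURCE B (Python) =====
-- from typing import List, Tuple
--
--
-- def reconstruct_array(n: int, b: List[int]) -> Tuple[bool, List[int]]:
--     # Top-down instead of bottom-up: memoized backward reachability over
--     # (mask, value) booleans, then one greedy backward walk rebuilds the
--     # answer; no per-state candidate lists are ever stored.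
--     full = (1 << (n - 1)) - 1
--     memo = {}
--
--     def reach(mask: int, v: int) -> bool:
--         key = (mask, v)
--         if key not in memo:
--             if mask == 1:
--                 memo[key] = b[0] > 0 and b[0] % v == 0 and b[0] // v <= 100
--             else:
--                 memo[key] = any(
--                     mask & (1 << i)
--                     and b[i] > 0 and b[i] % v == 0 and 1 <= b[i] // v <= 100
--                     and reach(mask ^ (1 << i), b[i] // v)
--                     for i in range(n - 1)
--                 )
--         return memo[key]
--
--     def path(mask: int, v: int) -> List[int]:
--         if mask == 1:
--             return [v]
--         for i in range(n - 1):
--             if (mask & (1 << i)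
--                     and b[i] > 0 and b[i] % v == 0 and 1 <= b[i] // v <= 100
--                     and reach(mask ^ (1 << i), b[i] // v)):
--                 return path(mask ^ (1 << i), b[i] // v) + [v]
--         return [v]
--
--     for v in range(1, 101):
--         if reach(full, v):
--             return True, path(full, v)
--     return False, []
-- ===== Notes on version B (the rewrite author's own statement) =====
-- stated objective: alternative
-- what changed: Replaces A's bottom-up triple-loop DP that stores a candidate list per (mask,value) state by a top-down memoized backward reachability recursion over boolean states plus one greedy backward walk that rebuilds the unique answer list at the end.
-- outside the precondition, e.g. on reconstruct_array(3, [997]): A returns (False, []), B raises IndexError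
import Mathlib
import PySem

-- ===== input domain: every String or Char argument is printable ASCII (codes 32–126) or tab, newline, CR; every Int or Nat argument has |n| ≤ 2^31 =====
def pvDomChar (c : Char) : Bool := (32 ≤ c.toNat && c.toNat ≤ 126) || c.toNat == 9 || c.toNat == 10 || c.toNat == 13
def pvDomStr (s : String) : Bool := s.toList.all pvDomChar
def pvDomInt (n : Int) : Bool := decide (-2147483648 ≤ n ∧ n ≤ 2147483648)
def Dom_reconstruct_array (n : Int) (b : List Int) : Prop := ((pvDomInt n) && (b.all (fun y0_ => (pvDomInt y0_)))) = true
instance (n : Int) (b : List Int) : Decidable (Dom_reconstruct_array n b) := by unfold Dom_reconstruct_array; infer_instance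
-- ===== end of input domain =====

-- B replaces A's bottom-up triple-loop DP that stores a candidate list per (mask,value)
-- state by a top-down backward-reachability recursion over boolean states plus one greedy
-- backward walk that rebuilds the answer list (objective: alternative algorithm).

-- 1 << i for a loop index i ≥ 0 (shared by both ports' transliterations)
def pvBit (i : Int) : Int := (1 : Int) <<< i.toNat

-- ===== PORT A =====
-- dp is a defaultdict of defaultdicts of lists; reads use the default ([] resp. {}),
-- which is exactly Python's defaultdict lookup for the values this program observes.
abbrev pvDP := PySem.Dict Int (PySem.Dict Int (List Int))

def pvReadA (dp : pvDP) (m v : Int) : List Int :=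
  (dp.getD m PySem.Dict.empty).getD v []

def pvWriteA (dp : pvDP) (m v : Int) (l : List Int) : pvDP :=
  dp.insert m ((dp.getD m PySem.Dict.empty).insert v l)

-- for i in range(n-1): if not (mask & (1 << i)): for next_val in range(1,101): …
-- '1 << i' is ported as '(1 : Int) <<< i.toNat', exact since every i here is ≥ 0.
def pvStepAI (b : List Int) (mask last : Int) (dp : pvDP) (i : Int) : pvDP :=
  if PySem.Int.band mask (pvBit i) == 0 then
    (PySem.List.pyRange 1 101).foldl (fun dp next_val =>
      if last * next_val == PySem.List.pyGetD b i 0 then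
        pvWriteA dp (PySem.Int.bor mask (pvBit i)) next_val
          (pvReadA dp mask last ++ [next_val])
      else dp) dp
  else dp

-- for last in range(1,101): if dp[mask][last]: …
def pvStepALast (n : Int) (b : List Int) (mask : Int) (dp : pvDP) (last : Int) : pvDP :=
  if pvReadA dp mask last ≠ [] then
    (PySem.List.pyRange 0 (n - 1)).foldl (pvStepAI b mask last) dp
  else dp

def pvStepAMask (n : Int) (b : List Int) (dp : pvDP) (mask : Int) : pvDP :=
  (PySem.List.pyRange 1 101).foldl (pvStepALast n b mask) dp

-- literal port of A; b[0]/b[i] use pyGetD (the IndexError cases are outside Pre_),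
-- '1 << (n-1)' is ported as '(1 : Int) <<< (n-1).toNat', exact for n ≥ 1 (n ≤ 0 raises in Python).
def reconstruct_array (n : Int) (b : List Int) : Bool × List Int :=
  let dp : pvDP :=
    (PySem.List.pyRange 1 101).foldl (fun dp a1 =>
      if (PySem.List.pyRange 1 101).any (fun a2 => a1 * a2 == PySem.List.pyGetD b 0 0) then
        pvWriteA dp 1 a1 [a1]
      else dp) PySem.Dict.empty
  let dp := (PySem.List.pyRange 1 ((1 : Int) <<< (n - 1).toNat)).foldl (pvStepAMask n b) dp
  let full : Int := ((1 : Int) <<< (n - 1).toNat) - 1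
  match (PySem.List.pyRange 1 101).find? (fun last => decide (pvReadA dp full last ≠ [])) with
  | some last => (true, pvReadA dp full last)
  | none => (false, [])

-- ===== PORT B =====
-- b[0] > 0 and b[0] % v == 0 and b[0] // v <= 100   (reach's base case)
def pvBaseB (b : List Int) (v : Int) : Bool :=
  decide (0 < PySem.List.pyGetD b 0 0 ∧ PySem.Int.mod (PySem.List.pyGetD b 0 0) v = 0 ∧
    PySem.Int.floordiv (PySem.List.pyGetD b 0 0) v ≤ 100)

-- b[i] > 0 and b[i] % v == 0 and 1 <= b[i] // v <= 100   (the shared edge test)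
def pvOkB (b : List Int) (v i : Int) : Bool :=
  decide (0 < PySem.List.pyGetD b i 0 ∧ PySem.Int.mod (PySem.List.pyGetD b i 0) v = 0 ∧
    1 ≤ PySem.Int.floordiv (PySem.List.pyGetD b i 0) v ∧
    PySem.Int.floordiv (PySem.List.pyGetD b i 0) v ≤ 100)

-- reach(mask, v): Python's recursion terminates because every call clears one set bit;
-- ported with a fuel ≥ the mask (the memo dict of Source B is pure caching of the same
-- values and does not change any result; it is ported as plain recursion).
def pvReachB (n : Int) (b : List Int) : Nat → Int → Int → Bool
  | 0, _, _ => false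
  | f+1, mask, v =>
    if mask == 1 then pvBaseB b v
    else
      (PySem.List.pyRange 0 (n - 1)).any fun i =>
        decide (PySem.Int.band mask (pvBit i) ≠ 0) && pvOkB b v i &&
        pvReachB n b f (PySem.Int.bxor mask (pvBit i))
          (PySem.Int.floordiv (PySem.List.pyGetD b i 0) v)

-- path(mask, v): first i whose edge test and reach succeed, then recurse on the rest
def pvPathB (n : Int) (b : List Int) : Nat → Int → Int → List Int
  | 0, _, v => [v]
  | f+1, mask, v =>
    if mask == 1 then [v]
    else
      match (PySem.List.pyRange 0 (n - 1)).find? (fun i =>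
          decide (PySem.Int.band mask (pvBit i) ≠ 0) && pvOkB b v i &&
          pvReachB n b f (PySem.Int.bxor mask (pvBit i))
            (PySem.Int.floordiv (PySem.List.pyGetD b i 0) v)) with
      | some i => pvPathB n b f (PySem.Int.bxor mask (pvBit i))
          (PySem.Int.floordiv (PySem.List.pyGetD b i 0) v) ++ [v]
      | none => [v]

-- literal port of B (same shift/index conventions as the port of A)
def reconstruct_array_alt (n : Int) (b : List Int) : Bool × List Int :=
  let full : Int := ((1 : Int) <<< (n - 1).toNat) - 1
  match (PySem.List.pyRange 1 101).find? (fun v => pvReachB n b (full.toNat + 1) full v) with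
  | some v => (true, pvPathB n b (full.toNat + 1) full v)
  | none => (false, [])

-- ===== PRECONDITION & SPEC =====
-- Pre_ excludes b = [] (A: IndexError on b[0]) and n ≤ 0 (A: ValueError on 1 << (n-1)),
-- and it also excludes len(b) < n-1: there A raises an IndexError on b[i] whenever b[0]
-- has a factorisation into two values 1..100, and on the remaining short inputs B's
-- backward probe itself raises the IndexError that A's then-empty forward DP avoids.
def Pre_reconstruct_array (n : Int) (b : List Int) : Prop :=
  b ≠ [] ∧ 1 ≤ n ∧ n - 1 ≤ (b.length : Int)
instance (n : Int) (b : List Int) : Decidable (Pre_reconstruct_array n b) := by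
  unfold Pre_reconstruct_array; infer_instance

def pvWitness_reconstruct_array : Int × List Int := (3, [2, 6])

def Spec_reconstruct_array (n : Int) (b : List Int) (out : Bool × List Int) : Prop := out = reconstruct_array_alt n b
instance (n : Int) (b : List Int) (out : Bool × List Int) : Decidable (Spec_reconstruct_array n b out) := by unfold Spec_reconstruct_array; infer_instance

-- ===== CLAIM (what is proved, stated in full; the proofs are below) =====
def Claim_equal_reconstruct_array : Prop := ∀ (n : Int) (b : List Int), Dom_reconstruct_array n b → Pre_reconstruct_array n b → Spec_reconstruct_array n b (reconstruct_array n b)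

-- ===== LEMMAS AND PROOFS =====

-- ---- generic dictionary/fold plumbing ----

theorem pvReadA_write (dp : pvDP) (m v m' v' : Int) (l : List Int) :
    pvReadA (pvWriteA dp m v l) m' v' = if m' = m ∧ v' = v then l else pvReadA dp m' v' := by
  unfold pvReadA pvWriteA
  by_cases hm : m' = m
  · subst hm
    simp [PySem.Dict.getD_insert]
  · simp [PySem.Dict.getD_insert, hm]

theorem pvFind_congr {α : Type} (l : List α) (p q : α → Bool)
    (h : ∀ x ∈ l, p x = q x) : l.find? p = l.find? q := by
  induction l with
  | nil => rfl
  | cons a t ih =>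
    simp only [List.find?]
    rw [h a (by simp)]
    cases q a
    · exact ih fun x hx => h x (by simp [hx])
    · rfl

theorem pvAny_congr {α : Type} (l : List α) (p q : α → Bool)
    (h : ∀ x ∈ l, p x = q x) : l.any p = l.any q := by
  induction l with
  | nil => rfl
  | cons a t ih =>
    simp only [List.any_cons]
    rw [h a (by simp), ih fun x hx => h x (by simp [hx])]

-- ---- arithmetic: A's scans are B's divisor checks ----

theorem pvDiv_char (last bi v : Int) (hl : 1 ≤ last) (h1 : 1 ≤ v) (h2 : v ≤ 100) :
    last * v = bi ↔
      (bi > 0 ∧ PySem.Int.mod bi last = 0 ∧ PySem.Int.floordiv bi last ≤ 100 ∧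
        PySem.Int.floordiv bi last = v) := by
  have hlpos : (0:Int) < last := by omega
  rw [PySem.Int.mod_eq_zero_iff_dvd, PySem.Int.floordiv_eq_ediv_of_pos hlpos]
  constructor
  · rintro rfl
    refine ⟨by positivity, ⟨v, rfl⟩, ?_, ?_⟩
    · rw [Int.mul_ediv_cancel_left v (by omega)]; omega
    · rw [Int.mul_ediv_cancel_left v (by omega)]
  · rintro ⟨hpos, ⟨t, rfl⟩, hle, heq⟩
    rw [Int.mul_ediv_cancel_left t (by omega)] at heq
    rw [heq]

theorem pvQuot_bounds (a1 b0 : Int) (h1 : 1 ≤ a1) (hpos : b0 > 0)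
    (hmod : PySem.Int.mod b0 a1 = 0) :
    1 ≤ PySem.Int.floordiv b0 a1 ∧ a1 * PySem.Int.floordiv b0 a1 = b0 := by
  have hlpos : (0:Int) < a1 := by omega
  obtain ⟨t, rfl⟩ := (PySem.Int.mod_eq_zero_iff_dvd b0 a1).mp hmod
  rw [PySem.Int.floordiv_eq_ediv_of_pos hlpos, Int.mul_ediv_cancel_left t (by omega)]
  constructor
  · nlinarith
  · rfl

-- the base-row test 'any(a1 * a2 == b[0] for a2 in range(1, 101))' is B's divisor check
theorem pvAny_eq (a1 b0 : Int) (h1 : 1 ≤ a1) :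
    ((PySem.List.pyRange 1 101).any (fun a2 => a1 * a2 == b0) = true) ↔
      (b0 > 0 ∧ PySem.Int.mod b0 a1 = 0 ∧ PySem.Int.floordiv b0 a1 ≤ 100) := by
  rw [List.any_eq_true]
  constructor
  · rintro ⟨a2, hmem, hEq⟩
    rw [PySem.List.mem_pyRange_one] at hmem
    have := (pvDiv_char a1 b0 a2 h1 (by omega) (by omega)).mp (by exact_mod_cast beq_iff_eq.mp hEq)
    exact ⟨this.1, this.2.1, this.2.2.1⟩
  · rintro ⟨hpos, hmod, hdiv⟩
    obtain ⟨hq1, hq2⟩ := pvQuot_bounds a1 b0 h1 hpos hmod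
    refine ⟨PySem.Int.floordiv b0 a1, ?_, by rw [beq_iff_eq]; exact hq2⟩
    rw [PySem.List.mem_pyRange_one]
    omega

theorem pvFilter_single (last bi : Int) (hl : 1 ≤ last)
    (hcond : bi > 0 ∧ PySem.Int.mod bi last = 0 ∧ PySem.Int.floordiv bi last ≤ 100) :
    (PySem.List.pyRange 1 101).filter (fun v => last * v == bi) =
      [PySem.Int.floordiv bi last] := by
  obtain ⟨hpos, hmod, hdiv⟩ := hcond
  obtain ⟨hq1, hq2⟩ := pvQuot_bounds last bi hl hpos hmod
  generalize hgq : PySem.Int.floordiv bi last = q at hq1 hq2 hdiv ⊢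
  have hsplit : PySem.List.pyRange 1 101 =
      PySem.List.pyRange 1 q ++ q :: PySem.List.pyRange (q + 1) 101 := by
    rw [PySem.List.pyRange_one_append 1 q 101 (by omega) (by omega),
      PySem.List.pyRange_one_cons (a := q) (b := 101) (by omega)]
  rw [hsplit, List.filter_append, List.filter_cons]
  have hno : ∀ x : Int, 1 ≤ x → x ≤ 100 → x ≠ q → ((fun v => last * v == bi) x) = false := by
    intro x hx1 hx2 hxq
    simp only [beq_eq_false_iff_ne, ne_eq]
    intro hEq
    have h := ((pvDiv_char last bi x hl hx1 hx2).mp hEq).2.2.2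
    rw [hgq] at h
    exact hxq h.symm
  have h1 : (PySem.List.pyRange 1 q).filter (fun v => last * v == bi) = [] := by
    rw [List.filter_eq_nil_iff]
    intro x hx
    rw [PySem.List.mem_pyRange_one] at hx
    simp only [hno x (by omega) (by omega) (by omega), Bool.false_eq_true, not_false_eq_true]
  have h2 : (PySem.List.pyRange (q + 1) 101).filter (fun v => last * v == bi) = [] := by
    rw [List.filter_eq_nil_iff]
    intro x hx
    rw [PySem.List.mem_pyRange_one] at hx
    simp only [hno x (by omega) (by omega) (by omega), Bool.false_eq_true, not_false_eq_true]
  rw [h1, h2]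
  simp [hq2]

-- A's scan over candidate next values hits at most once: it is a single
-- divisibility/quotient check
theorem pvScan_eq (last bi : Int) (h1 : 1 ≤ last)
    (W : pvDP → Int → pvDP) (dp : pvDP) :
    (PySem.List.pyRange 1 101).foldl
        (fun dp next_val => if last * next_val == bi then W dp next_val else dp) dp =
      if bi > 0 ∧ PySem.Int.mod bi last = 0 ∧ PySem.Int.floordiv bi last ≤ 100 then
        W dp (PySem.Int.floordiv bi last)
      else dp := by
  rw [PySem.List.foldl_if_eq_foldl_filter]
  by_cases hcond : bi > 0 ∧ PySem.Int.mod bi last = 0 ∧ PySem.Int.floordiv bi last ≤ 100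
  · rw [pvFilter_single last bi h1 hcond, if_pos hcond]
    rfl
  · rw [if_neg hcond]
    have : (PySem.List.pyRange 1 101).filter (fun v => last * v == bi) = [] := by
      rw [List.filter_eq_nil_iff]
      intro x hx
      rw [PySem.List.mem_pyRange_one] at hx
      simp only [beq_iff_eq]
      intro hEq
      have := (pvDiv_char last bi x h1 (by omega) (by omega)).mp hEq
      exact hcond ⟨this.1, this.2.1, this.2.2.1⟩
    rw [this]
    rfl

-- ---- single-bit arithmetic on Nat masks ----

theorem pvBit_cast (k : Nat) : (1 : Int) <<< k = ((2 ^ k : Nat) : Int) := by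
  rw [Int.shiftLeft_eq]; push_cast; ring

theorem pvBand_ne (M : Int) (k : Nat) (h0 : 0 ≤ M) :
    (PySem.Int.band M ((1 : Int) <<< k) ≠ 0) ↔ M.toNat.testBit k = true := by
  rw [pvBit_cast]
  obtain ⟨m, rfl⟩ := Int.eq_ofNat_of_zero_le h0
  rw [PySem.Int.band_natCast]
  rw [Nat.and_two_pow]
  simp only [Int.toNat_natCast]
  have hp : 0 < 2 ^ k := Nat.two_pow_pos k
  cases m.testBit k <;> simp <;> omega

theorem pvBxor_cast (M : Int) (k : Nat) (h0 : 0 ≤ M) :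
    PySem.Int.bxor M ((1 : Int) <<< k) = ((M.toNat ^^^ 2 ^ k : Nat) : Int) := by
  rw [pvBit_cast]
  obtain ⟨m, rfl⟩ := Int.eq_ofNat_of_zero_le h0
  rw [PySem.Int.bxor_natCast]
  simp

theorem pvBor_cast (M : Int) (k : Nat) (h0 : 0 ≤ M) :
    PySem.Int.bor M ((1 : Int) <<< k) = ((M.toNat ||| 2 ^ k : Nat) : Int) := by
  rw [pvBit_cast]
  obtain ⟨m, rfl⟩ := Int.eq_ofNat_of_zero_le h0
  rw [PySem.Int.bor_natCast]
  simp

theorem pvBandB_ne (M i : Int) (h0 : 0 ≤ M) :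
    (PySem.Int.band M (pvBit i) ≠ 0) ↔ M.toNat.testBit i.toNat = true := pvBand_ne M i.toNat h0

theorem pvBxorB_cast (M i : Int) (h0 : 0 ≤ M) :
    PySem.Int.bxor M (pvBit i) = ((M.toNat ^^^ 2 ^ i.toNat : Nat) : Int) := pvBxor_cast M i.toNat h0

theorem pvBorB_cast (M i : Int) (h0 : 0 ≤ M) :
    PySem.Int.bor M (pvBit i) = ((M.toNat ||| 2 ^ i.toNat : Nat) : Int) := pvBor_cast M i.toNat h0

theorem pvXorLt (m : Nat) (k : Nat) (h : m.testBit k = true) : m ^^^ 2 ^ k < m := by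
  apply Nat.lt_of_testBit k
  · simp [Nat.testBit_xor, Nat.testBit_two_pow, h]
  · exact h
  · intro j hj
    simp [Nat.testBit_xor, Nat.testBit_two_pow, decide_eq_false (by omega : ¬ k = j)]

theorem pvOrGt (m : Nat) (k : Nat) (h : m.testBit k = false) : m < m ||| 2 ^ k := by
  apply Nat.lt_of_testBit k h
  · simp [Nat.testBit_or, Nat.testBit_two_pow]
  · intro j hj
    simp [Nat.testBit_or, Nat.testBit_two_pow, decide_eq_false (by omega : ¬ k = j)]

theorem pvOrXor (m : Nat) (k : Nat) (h : m.testBit k = false) : (m ||| 2 ^ k) ^^^ 2 ^ k = m := by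
  apply Nat.eq_of_testBit_eq
  intro i
  by_cases hik : k = i
  · subst hik
    simp [Nat.testBit_xor, Nat.testBit_or, Nat.testBit_two_pow, h]
  · simp [Nat.testBit_xor, Nat.testBit_or, Nat.testBit_two_pow, hik]

theorem pvXorOr (m : Nat) (k : Nat) (h : m.testBit k = true) : (m ^^^ 2 ^ k) ||| 2 ^ k = m := by
  apply Nat.eq_of_testBit_eq
  intro i
  by_cases hik : k = i
  · subst hik
    simp [Nat.testBit_xor, Nat.testBit_or, Nat.testBit_two_pow, h]
  · simp [Nat.testBit_xor, Nat.testBit_or, Nat.testBit_two_pow, hik]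

theorem pvXorTestBit (m : Nat) (k : Nat) : (m ^^^ 2 ^ k).testBit k = !m.testBit k := by
  simp [Nat.testBit_xor, Nat.testBit_two_pow]

theorem pvXorLtXor (m : Nat) (k k' : Nat) (hk : m.testBit k = true) (hk' : m.testBit k' = true)
    (hlt : k' < k) : m ^^^ 2 ^ k < m ^^^ 2 ^ k' := by
  apply Nat.lt_of_testBit k
  · simp [Nat.testBit_xor, Nat.testBit_two_pow, hk]
  · simp [Nat.testBit_xor, Nat.testBit_two_pow, hk, decide_eq_false (by omega : ¬ k' = k)]
  · intro j hj
    simp [Nat.testBit_xor, Nat.testBit_two_pow, decide_eq_false (by omega : ¬ k = j),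
      decide_eq_false (by omega : ¬ k' = j)]

theorem pvOrInj (a : Nat) (k k' : Nat) (h : a.testBit k = false) (h' : a.testBit k' = false)
    (he : a ||| 2 ^ k = a ||| 2 ^ k') : k = k' := by
  by_contra hne
  have := congrArg (fun x => x.testBit k) he
  simp [Nat.testBit_or, Nat.testBit_two_pow, h, h'] at this
  exact hne this.symm

-- ---- the canonical (fuel-free) reading of B's recursion ----

def pvReachC (n : Int) (b : List Int) (M v : Int) : Bool := pvReachB n b (M.toNat + 1) M v
def pvPathC (n : Int) (b : List Int) (M v : Int) : List Int := pvPathB n b (M.toNat + 1) M v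

def pvValidC (n : Int) (b : List Int) (M v i : Int) : Bool :=
  decide (PySem.Int.band M (pvBit i) ≠ 0) && pvOkB b v i &&
  pvReachC n b (PySem.Int.bxor M (pvBit i))
    (PySem.Int.floordiv (PySem.List.pyGetD b i 0) v)

theorem pvReachB_fuel (n : Int) (b : List Int) :
    ∀ (f1 f2 : Nat) (M v : Int), 0 ≤ M → M.toNat < f1 → M.toNat < f2 →
      pvReachB n b f1 M v = pvReachB n b f2 M v := by
  intro f1
  induction f1 with
  | zero => intro f2 M v h0 h1 h2; omega
  | succ f ih =>
    intro f2 M v h0 h1 h2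
    obtain ⟨g, rfl⟩ : ∃ g, f2 = g + 1 := ⟨f2 - 1, by omega⟩
    show pvReachB n b (f+1) M v = pvReachB n b (g+1) M v
    simp only [pvReachB]
    by_cases hM : (M == 1) = true
    · rw [if_pos hM, if_pos hM]
    · rw [if_neg (by exact hM), if_neg (by exact hM)]
      apply pvAny_congr
      intro i _
      by_cases hb : (PySem.Int.band M (pvBit i) ≠ 0)
      · have hbit : M.toNat.testBit i.toNat = true := (pvBandB_ne M i h0).mp hb
        have hx := pvBxorB_cast M i h0
        have hlt : (PySem.Int.bxor M (pvBit i)).toNat < M.toNat := by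
          rw [hx, Int.toNat_natCast]; exact pvXorLt _ _ hbit
        have hnn : 0 ≤ PySem.Int.bxor M (pvBit i) := by
          rw [hx]; exact Int.natCast_nonneg _
        rw [ih g _ _ hnn (by omega) (by omega)]
      · rw [not_not.mp hb]
        simp

theorem pvPathB_fuel (n : Int) (b : List Int) :
    ∀ (f1 f2 : Nat) (M v : Int), 0 ≤ M → M.toNat < f1 → M.toNat < f2 →
      pvPathB n b f1 M v = pvPathB n b f2 M v := by
  intro f1
  induction f1 with
  | zero => intro f2 M v h0 h1 h2; omega
  | succ f ih =>
    intro f2 M v h0 h1 h2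
    obtain ⟨g, rfl⟩ : ∃ g, f2 = g + 1 := ⟨f2 - 1, by omega⟩
    show pvPathB n b (f+1) M v = pvPathB n b (g+1) M v
    simp only [pvPathB]
    by_cases hM : (M == 1) = true
    · rw [if_pos hM, if_pos hM]
    · rw [if_neg (by exact hM), if_neg (by exact hM)]
      have hcongr : (PySem.List.pyRange 0 (n - 1)).find? (fun i =>
          decide (PySem.Int.band M (pvBit i) ≠ 0) && pvOkB b v i &&
          pvReachB n b f (PySem.Int.bxor M (pvBit i))
            (PySem.Int.floordiv (PySem.List.pyGetD b i 0) v)) =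
        (PySem.List.pyRange 0 (n - 1)).find? (fun i =>
          decide (PySem.Int.band M (pvBit i) ≠ 0) && pvOkB b v i &&
          pvReachB n b g (PySem.Int.bxor M (pvBit i))
            (PySem.Int.floordiv (PySem.List.pyGetD b i 0) v)) := by
        apply pvFind_congr
        intro i _
        by_cases hb : (PySem.Int.band M (pvBit i) ≠ 0)
        · have hbit : M.toNat.testBit i.toNat = true := (pvBandB_ne M i h0).mp hb
          have hx := pvBxorB_cast M i h0
          have hlt : (PySem.Int.bxor M (pvBit i)).toNat < M.toNat := by
            rw [hx, Int.toNat_natCast]; exact pvXorLt _ _ hbit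
          have hnn : 0 ≤ PySem.Int.bxor M (pvBit i) := by
            rw [hx]; exact Int.natCast_nonneg _
          rw [pvReachB_fuel n b f g _ _ hnn (by omega) (by omega)]
        · rw [not_not.mp hb]
          simp
      rw [hcongr]
      cases hfind : (PySem.List.pyRange 0 (n - 1)).find? (fun i =>
          decide (PySem.Int.band M (pvBit i) ≠ 0) && pvOkB b v i &&
          pvReachB n b g (PySem.Int.bxor M (pvBit i))
            (PySem.Int.floordiv (PySem.List.pyGetD b i 0) v)) with
      | none => rfl
      | some i =>
        have hp := List.find?_some hfind
        have hb : (PySem.Int.band M (pvBit i) ≠ 0) := by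
          by_contra hcon
          rw [hcon] at hp
          simp at hp
        have hbit : M.toNat.testBit i.toNat = true := (pvBandB_ne M i h0).mp hb
        have hx := pvBxorB_cast M i h0
        have hlt : (PySem.Int.bxor M (pvBit i)).toNat < M.toNat := by
          rw [hx, Int.toNat_natCast]; exact pvXorLt _ _ hbit
        have hnn : 0 ≤ PySem.Int.bxor M (pvBit i) := by
          rw [hx]; exact Int.natCast_nonneg _
        dsimp only
        rw [ih g _ _ hnn (by omega) (by omega)]

theorem pvReachC_eq (n : Int) (b : List Int) (M v : Int) (h0 : 0 ≤ M) :
    pvReachC n b M v =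
      if M = 1 then pvBaseB b v
      else (PySem.List.pyRange 0 (n - 1)).any (pvValidC n b M v) := by
  show pvReachB n b (M.toNat + 1) M v = _
  simp only [pvReachB]
  by_cases hM : M = 1
  · simp [hM]
  · rw [if_neg (by simp [hM]), if_neg hM]
    apply pvAny_congr
    intro i _
    unfold pvValidC pvReachC
    by_cases hb : (PySem.Int.band M (pvBit i) ≠ 0)
    · have hbit : M.toNat.testBit i.toNat = true := (pvBandB_ne M i h0).mp hb
      have hx := pvBxorB_cast M i h0
      have hlt : (PySem.Int.bxor M (pvBit i)).toNat < M.toNat := by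
        rw [hx, Int.toNat_natCast]; exact pvXorLt _ _ hbit
      have hnn : 0 ≤ PySem.Int.bxor M (pvBit i) := by
        rw [hx]; exact Int.natCast_nonneg _
      rw [pvReachB_fuel n b M.toNat ((PySem.Int.bxor M (pvBit i)).toNat + 1) _ _ hnn (by omega) (by omega)]
    · rw [not_not.mp hb]
      simp

theorem pvPathC_eq (n : Int) (b : List Int) (M v : Int) (h0 : 0 ≤ M) :
    pvPathC n b M v =
      if M = 1 then [v]
      else
        match (PySem.List.pyRange 0 (n - 1)).find? (pvValidC n b M v) with
        | some i => pvPathC n b (PySem.Int.bxor M (pvBit i))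
            (PySem.Int.floordiv (PySem.List.pyGetD b i 0) v) ++ [v]
        | none => [v] := by
  show pvPathB n b (M.toNat + 1) M v = _
  simp only [pvPathB]
  by_cases hM : M = 1
  · simp [hM]
  · rw [if_neg (by simp [hM]), if_neg hM]
    have hcongr : (PySem.List.pyRange 0 (n - 1)).find? (fun i =>
        decide (PySem.Int.band M (pvBit i) ≠ 0) && pvOkB b v i &&
        pvReachB n b M.toNat (PySem.Int.bxor M (pvBit i))
          (PySem.Int.floordiv (PySem.List.pyGetD b i 0) v)) =
      (PySem.List.pyRange 0 (n - 1)).find? (pvValidC n b M v) := by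
      apply pvFind_congr
      intro i _
      unfold pvValidC pvReachC
      by_cases hb : (PySem.Int.band M (pvBit i) ≠ 0)
      · have hbit : M.toNat.testBit i.toNat = true := (pvBandB_ne M i h0).mp hb
        have hx := pvBxorB_cast M i h0
        have hlt : (PySem.Int.bxor M (pvBit i)).toNat < M.toNat := by
          rw [hx, Int.toNat_natCast]; exact pvXorLt _ _ hbit
        have hnn : 0 ≤ PySem.Int.bxor M (pvBit i) := by
          rw [hx]; exact Int.natCast_nonneg _
        rw [pvReachB_fuel n b M.toNat ((PySem.Int.bxor M (pvBit i)).toNat + 1) _ _ hnn (by omega) (by omega)]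
      · rw [not_not.mp hb]
        simp
    rw [hcongr]
    cases hfind : (PySem.List.pyRange 0 (n - 1)).find? (pvValidC n b M v) with
    | none => rfl
    | some i =>
      have hp := List.find?_some hfind
      have hb : (PySem.Int.band M (pvBit i) ≠ 0) := by
        by_contra hcon
        unfold pvValidC at hp
        rw [hcon] at hp
        simp at hp
      have hbit : M.toNat.testBit i.toNat = true := (pvBandB_ne M i h0).mp hb
      have hx := pvBxorB_cast M i h0
      have hlt : (PySem.Int.bxor M (pvBit i)).toNat < M.toNat := by
        rw [hx, Int.toNat_natCast]; exact pvXorLt _ _ hbit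
      have hnn : 0 ≤ PySem.Int.bxor M (pvBit i) := by
        rw [hx]; exact Int.natCast_nonneg _
      dsimp only
      rw [pvPathB_fuel n b M.toNat ((PySem.Int.bxor M (pvBit i)).toNat + 1) _ _ hnn (by omega) (by omega)]
      rfl

-- ---- the functional characterisation of A's dp entries ----

-- value of dp[M][v] once every stage (= source mask) below a has run
def pvEntry (n : Int) (b : List Int) (a M v : Int) : List Int :=
  if M = 1 then (if pvBaseB b v then [v] else [])
  else
    match (PySem.List.pyRange 0 (n - 1)).find? (fun i =>
        pvValidC n b M v i && decide (PySem.Int.bxor M (pvBit i) < a)) with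
    | some i => pvPathC n b (PySem.Int.bxor M (pvBit i))
        (PySem.Int.floordiv (PySem.List.pyGetD b i 0) v) ++ [v]
    | none => []

-- its limit: the final value of dp[M][v]
def pvEntryF (n : Int) (b : List Int) (M v : Int) : List Int :=
  if M = 1 then (if pvBaseB b v then [v] else [])
  else
    match (PySem.List.pyRange 0 (n - 1)).find? (pvValidC n b M v) with
    | some i => pvPathC n b (PySem.Int.bxor M (pvBit i))
        (PySem.Int.floordiv (PySem.List.pyGetD b i 0) v) ++ [v]
    | none => []

theorem pvEntry_ne_one (n : Int) (b : List Int) (c M v : Int) (hM1 : M ≠ 1) :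
    pvEntry n b c M v =
      match (PySem.List.pyRange 0 (n - 1)).find? (fun i =>
          pvValidC n b M v i && decide (PySem.Int.bxor M (pvBit i) < c)) with
      | some i => pvPathC n b (PySem.Int.bxor M (pvBit i))
          (PySem.Int.floordiv (PySem.List.pyGetD b i 0) v) ++ [v]
      | none => [] := by
  unfold pvEntry
  rw [if_neg hM1]

theorem pvEntry_one (n : Int) (b : List Int) (c v : Int) :
    pvEntry n b c 1 v = if pvBaseB b v then [v] else [] := by
  unfold pvEntry
  rw [if_pos rfl]

theorem pvEntry_settled (n : Int) (b : List Int) (a M v : Int) (h0 : 0 ≤ M) (hMa : M ≤ a) :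
    pvEntry n b a M v = pvEntryF n b M v := by
  unfold pvEntry pvEntryF
  by_cases hM : M = 1
  · simp [hM]
  · rw [if_neg hM, if_neg hM]
    have hfc : (PySem.List.pyRange 0 (n - 1)).find? (fun i =>
        pvValidC n b M v i && decide (PySem.Int.bxor M (pvBit i) < a)) =
        (PySem.List.pyRange 0 (n - 1)).find? (pvValidC n b M v) := by
      apply pvFind_congr
      intro i _
      by_cases hb : (PySem.Int.band M (pvBit i) ≠ 0)
      · have hbit : M.toNat.testBit i.toNat = true := (pvBandB_ne M i h0).mp hb
        have hx := pvBxorB_cast M i h0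
        have hda : decide (PySem.Int.bxor M (pvBit i) < a) = true := by
          apply decide_eq_true
          have h1 : M.toNat ^^^ 2 ^ i.toNat < M.toNat := pvXorLt _ _ hbit
          have h2 : ((M.toNat : Nat) : Int) = M := Int.toNat_of_nonneg h0
          rw [hx]
          omega
        rw [hda, Bool.and_true]
      · have hv : pvValidC n b M v i = false := by
          unfold pvValidC
          rw [not_not.mp hb]
          simp
        rw [hv]
        simp
    rw [hfc]

theorem pvEntryF_reach (n : Int) (b : List Int) (M v : Int) (h0 : 0 ≤ M) :
    pvReachC n b M v = true ↔ pvEntryF n b M v ≠ [] := by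
  rw [pvReachC_eq n b M v h0]
  unfold pvEntryF
  by_cases hM : M = 1
  · rw [if_pos hM, if_pos hM]
    cases hB : pvBaseB b v <;> simp
  · rw [if_neg hM, if_neg hM]
    have hiff : ((PySem.List.pyRange 0 (n - 1)).any (pvValidC n b M v) = true) ↔
        ((PySem.List.pyRange 0 (n - 1)).find? (pvValidC n b M v)).isSome := by
      rw [List.any_eq_true, List.find?_isSome]
    cases hf : (PySem.List.pyRange 0 (n - 1)).find? (pvValidC n b M v) with
    | none => simp [hf] at hiff ⊢; exact hiff
    | some i => simp [hf] at hiff; simp [hiff]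

theorem pvEntryF_path (n : Int) (b : List Int) (M v : Int) (h0 : 0 ≤ M)
    (hr : pvReachC n b M v = true) : pvPathC n b M v = pvEntryF n b M v := by
  rw [pvPathC_eq n b M v h0]
  rw [pvReachC_eq n b M v h0] at hr
  unfold pvEntryF
  by_cases hM : M = 1
  · rw [if_pos hM, if_pos hM]
    rw [if_pos hM] at hr
    rw [hr]
    simp
  · rw [if_neg hM, if_neg hM]
    rw [if_neg hM] at hr
    cases hf : (PySem.List.pyRange 0 (n - 1)).find? (pvValidC n b M v) with
    | none =>
      exfalso
      rw [List.any_eq_true] at hr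
      obtain ⟨x, hx, hpx⟩ := hr
      rw [List.find?_eq_none] at hf
      exact absurd hpx (by simpa using hf x hx)
    | some i => rfl

-- ---- the per-stage effect of A's loops ----

-- the write that source (a, last=l) performs at bit i hits target (M, v)
def pvHitB (b : List Int) (a l M v : Int) (i : Int) : Bool :=
  (PySem.Int.band a (pvBit i) == 0) &&
  decide (PySem.List.pyGetD b i 0 > 0 ∧ PySem.Int.mod (PySem.List.pyGetD b i 0) l = 0 ∧
    PySem.Int.floordiv (PySem.List.pyGetD b i 0) l ≤ 100) &&
  (M == PySem.Int.bor a (pvBit i)) &&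
  (PySem.Int.floordiv (PySem.List.pyGetD b i 0) l == v)

theorem pvHit_ne_self (b : List Int) (a l v i : Int) (ha : 0 ≤ a) (l' : Int) :
    pvHitB b a l a l' i = false := by
  unfold pvHitB
  cases hb : (PySem.Int.band a (pvBit i) == 0) with
  | false => simp
  | true =>
    have hbit : a.toNat.testBit i.toNat = false := by
      by_contra hcon
      have := (pvBandB_ne a i ha).mpr (by simpa using hcon)
      simp [beq_iff_eq.mp hb] at this
    have hlt : a < PySem.Int.bor a (pvBit i) := by
      rw [pvBorB_cast a i ha]
      have h1 : a.toNat < a.toNat ||| 2 ^ i.toNat := pvOrGt _ _ hbit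
      have h2 : ((a.toNat : Nat) : Int) = a := Int.toNat_of_nonneg ha
      omega
    have hne : (a == PySem.Int.bor a (pvBit i)) = false := by
      rw [beq_eq_false_iff_ne]
      omega
    rw [hne]
    simp

theorem pvStepAI_read (b : List Int) (a l : Int) (dp : pvDP) (i M v : Int) (hl : 1 ≤ l) :
    pvReadA (pvStepAI b a l dp i) M v =
      if pvHitB b a l M v i then pvReadA dp a l ++ [v] else pvReadA dp M v := by
  unfold pvStepAI pvHitB
  cases hb : (PySem.Int.band a (pvBit i) == 0) with
  | false => simp
  | true =>
    rw [if_pos rfl]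
    rw [pvScan_eq l (PySem.List.pyGetD b i 0) hl
      (fun dp q => pvWriteA dp (PySem.Int.bor a (pvBit i)) q (pvReadA dp a l ++ [q])) dp]
    by_cases hcond : PySem.List.pyGetD b i 0 > 0 ∧
        PySem.Int.mod (PySem.List.pyGetD b i 0) l = 0 ∧
        PySem.Int.floordiv (PySem.List.pyGetD b i 0) l ≤ 100
    · rw [if_pos hcond]
      rw [pvReadA_write]
      rw [decide_eq_true hcond]
      by_cases hM : M = PySem.Int.bor a (pvBit i)
      · by_cases hv : PySem.Int.floordiv (PySem.List.pyGetD b i 0) l = v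
        · rw [if_pos ⟨hM, hv.symm⟩]
          rw [if_pos (by simp [hM, hv])]
          rw [hv]
        · rw [if_neg (by intro hc; exact hv hc.2.symm)]
          rw [if_neg (by simp [hv])]
      · rw [if_neg (by intro hc; exact hM hc.1)]
        rw [if_neg (by simp [hM])]
    · rw [if_neg hcond]
      rw [decide_eq_false hcond]
      simp

theorem pvFoldI_read (b : List Int) (a l : Int) (ha : 0 ≤ a) (hl : 1 ≤ l) :
    ∀ (I : List Int) (dp : pvDP) (M v : Int),
      pvReadA (I.foldl (pvStepAI b a l) dp) M v =
        if I.any (pvHitB b a l M v) then pvReadA dp a l ++ [v] else pvReadA dp M v := by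
  intro I
  induction I with
  | nil => intro dp M v; simp
  | cons i I ih =>
    intro dp M v
    simp only [List.foldl_cons, List.any_cons]
    rw [ih]
    have hself : pvReadA (pvStepAI b a l dp i) a l = pvReadA dp a l := by
      rw [pvStepAI_read b a l dp i a l hl, pvHit_ne_self b a l v i ha l]
      simp
    rw [hself, pvStepAI_read b a l dp i M v hl]
    by_cases hh : pvHitB b a l M v i = true <;>
      by_cases hany : I.any (pvHitB b a l M v) = true <;>
        simp [hh, hany]

theorem pvHitB_props (b : List Int) (a l M v : Int) (i : Int)
    (h : pvHitB b a l M v i = true) :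
    PySem.Int.band a (pvBit i) = 0 ∧
    (PySem.List.pyGetD b i 0 > 0 ∧ PySem.Int.mod (PySem.List.pyGetD b i 0) l = 0 ∧
      PySem.Int.floordiv (PySem.List.pyGetD b i 0) l ≤ 100) ∧
    M = PySem.Int.bor a (pvBit i) ∧
    PySem.Int.floordiv (PySem.List.pyGetD b i 0) l = v := by
  unfold pvHitB at h
  simp only [Bool.and_eq_true, beq_iff_eq, decide_eq_true_eq] at h
  exact ⟨h.1.1.1, h.1.1.2, h.1.2, h.2⟩

theorem pvHit_unique (b : List Int) (a l l' v : Int) (i i' : Int)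
    (ha : 0 ≤ a) (hv : 1 ≤ v) (hl : 1 ≤ l) (hl' : 1 ≤ l')
    (hi : 0 ≤ i) (hi' : 0 ≤ i') (M : Int)
    (h1 : pvHitB b a l M v i = true) (h2 : pvHitB b a l' M v i' = true) : l = l' := by
  obtain ⟨hb1, hc1, hM1, hq1⟩ := pvHitB_props b a l M v i h1
  obtain ⟨hb2, hc2, hM2, hq2⟩ := pvHitB_props b a l' M v i' h2
  have ht1 : a.toNat.testBit i.toNat = false := by
    by_contra hcon
    exact ((pvBandB_ne a i ha).mpr (by simpa using hcon)) hb1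
  have ht2 : a.toNat.testBit i'.toNat = false := by
    by_contra hcon
    exact ((pvBandB_ne a i' ha).mpr (by simpa using hcon)) hb2
  have hor : PySem.Int.bor a (pvBit i) = PySem.Int.bor a (pvBit i') := by rw [← hM1, ← hM2]
  rw [pvBorB_cast a i ha, pvBorB_cast a i' ha] at hor
  have hnat : a.toNat ||| 2 ^ i.toNat = a.toNat ||| 2 ^ i'.toNat := by exact_mod_cast hor
  have hii : i.toNat = i'.toNat := pvOrInj a.toNat i.toNat i'.toNat ht1 ht2 hnat
  have hieq : i = i' := by omega
  subst hieq
  have he1 := (pvQuot_bounds l (PySem.List.pyGetD b i 0) hl hc1.1 hc1.2.1).2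
  have he2 := (pvQuot_bounds l' (PySem.List.pyGetD b i 0) hl' hc2.1 hc2.2.1).2
  rw [hq1] at he1
  rw [hq2] at he2
  have : l * v = l' * v := by omega
  exact mul_right_cancel₀ (by omega) this

theorem pvFoldLast_read (n : Int) (b : List Int) (a : Int) (ha : 1 ≤ a) :
    ∀ (L : List Int), L.Nodup → (∀ x ∈ L, 1 ≤ x ∧ x ≤ 100) →
      ∀ (dp : pvDP), (∀ l', 1 ≤ l' → l' ≤ 100 → pvReadA dp a l' = pvEntry n b a a l') →
      ∀ (M v : Int), 1 ≤ v → v ≤ 100 →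
      pvReadA (L.foldl (pvStepALast n b a) dp) M v =
        match L.find? (fun l => decide (pvEntry n b a a l ≠ []) &&
            (PySem.List.pyRange 0 (n - 1)).any (pvHitB b a l M v)) with
        | some l => pvEntry n b a a l ++ [v]
        | none => pvReadA dp M v := by
  intro L
  induction L with
  | nil =>
    intro _ _ dp _ M v _ _
    rfl
  | cons l L ih =>
    intro hnd hbound dp hread M v hv1 hv2
    have hnotmem : l ∉ L := (List.nodup_cons.mp hnd).1
    have hl1 : 1 ≤ l := (hbound l (by simp)).1
    have hl2 : l ≤ 100 := (hbound l (by simp)).2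
    have hstep : ∀ M' v', pvReadA (pvStepALast n b a dp l) M' v' =
        if decide (pvEntry n b a a l ≠ []) &&
            (PySem.List.pyRange 0 (n - 1)).any (pvHitB b a l M' v') then
          pvEntry n b a a l ++ [v']
        else pvReadA dp M' v' := by
      intro M' v'
      unfold pvStepALast
      by_cases hg : pvReadA dp a l ≠ []
      · rw [if_pos hg]
        rw [pvFoldI_read b a l (by omega) hl1 _ dp M' v']
        rw [hread l hl1 hl2]
        have hge : pvEntry n b a a l ≠ [] := by rw [← hread l hl1 hl2]; exact hg
        rw [decide_eq_true hge, Bool.true_and]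
      · rw [if_neg hg]
        rw [hread l hl1 hl2] at hg
        rw [decide_eq_false hg, Bool.false_and]
        rfl
    have hread1 : ∀ l', 1 ≤ l' → l' ≤ 100 →
        pvReadA (pvStepALast n b a dp l) a l' = pvEntry n b a a l' := by
      intro l' h1 h2
      rw [hstep a l']
      have hanyf : (PySem.List.pyRange 0 (n - 1)).any (pvHitB b a l a l') = false := by
        rw [List.any_eq_false]
        intro i _
        rw [pvHit_ne_self b a l l' i (by omega) l']
        simp
      rw [hanyf, Bool.and_false]
      rw [if_neg (by simp)]
      exact hread l' h1 h2
    simp only [List.foldl_cons]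
    rw [ih (List.nodup_cons.mp hnd).2 (fun x hx => hbound x (by simp [hx])) _ hread1 M v hv1 hv2]
    by_cases hp : (decide (pvEntry n b a a l ≠ []) &&
        (PySem.List.pyRange 0 (n - 1)).any (pvHitB b a l M v)) = true
    · have hnone : L.find? (fun l => decide (pvEntry n b a a l ≠ []) &&
          (PySem.List.pyRange 0 (n - 1)).any (pvHitB b a l M v)) = none := by
        rw [List.find?_eq_none]
        intro l'' hmem
        intro hp''
        apply hnotmem
        have hany := (Bool.and_eq_true _ _).mp hp
        have hany'' := (Bool.and_eq_true _ _).mp hp''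
        obtain ⟨i, hi_mem, hhit⟩ := List.any_eq_true.mp hany.2
        obtain ⟨i'', hi_mem'', hhit''⟩ := List.any_eq_true.mp hany''.2
        have hi0 : 0 ≤ i := (PySem.List.mem_pyRange_one.mp hi_mem).1
        have hi0'' : 0 ≤ i'' := (PySem.List.mem_pyRange_one.mp hi_mem'').1
        have hle : l = l'' := pvHit_unique b a l l'' v i i'' (by omega) hv1 hl1
          (hbound l'' (by simp [hmem])).1 hi0 hi0'' M hhit hhit''
        rw [hle]
        exact hmem
      rw [List.find?_cons_of_pos (p := fun l => decide (pvEntry n b a a l ≠ []) && (PySem.List.pyRange 0 (n - 1)).any (pvHitB b a l M v)) hp, hnone]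
      rw [hstep M v, if_pos hp]
    · rw [List.find?_cons_of_neg (p := fun l => decide (pvEntry n b a a l ≠ []) && (PySem.List.pyRange 0 (n - 1)).any (pvHitB b a l M v)) (by exact hp)]
      cases hf : L.find? (fun l => decide (pvEntry n b a a l ≠ []) &&
          (PySem.List.pyRange 0 (n - 1)).any (pvHitB b a l M v)) with
      | some l'' => rfl
      | none =>
        rw [hstep M v, if_neg (by exact hp)]

-- how one stage advances the entry function
theorem pvEntry_evolve (n : Int) (b : List Int) (a M v : Int)
    (ha : 1 ≤ a) (hM : 0 ≤ M) (hv1 : 1 ≤ v) (hv2 : v ≤ 100) :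
    pvEntry n b (a + 1) M v =
      match (PySem.List.pyRange 1 101).find? (fun l => decide (pvEntry n b a a l ≠ []) &&
          (PySem.List.pyRange 0 (n - 1)).any (pvHitB b a l M v)) with
      | some l => pvEntry n b a a l ++ [v]
      | none => pvEntry n b a M v := by
  have ha0 : (0:Int) ≤ a := by omega
  cases hf : (PySem.List.pyRange 1 101).find? (fun l => decide (pvEntry n b a a l ≠ []) &&
      (PySem.List.pyRange 0 (n - 1)).any (pvHitB b a l M v)) with
  | some l =>
    have hpl := List.find?_some hf
    have hmem := List.mem_of_find?_eq_some hf
    rw [PySem.List.mem_pyRange_one] at hmem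
    obtain ⟨hl1, hl2'⟩ := hmem
    have hl2 : l ≤ 100 := by omega
    have hpl' := (Bool.and_eq_true _ _).mp hpl
    have hent : pvEntry n b a a l ≠ [] := of_decide_eq_true hpl'.1
    obtain ⟨i, himem, hhit⟩ := List.any_eq_true.mp hpl'.2
    rw [PySem.List.mem_pyRange_one] at himem
    obtain ⟨hi0, hin⟩ := himem
    obtain ⟨hband, hcond, hMeq, hq⟩ := pvHitB_props b a l M v i hhit
    have hbi : l * v = PySem.List.pyGetD b i 0 := by
      have := (pvQuot_bounds l (PySem.List.pyGetD b i 0) hl1 hcond.1 hcond.2.1).2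
      rw [hq] at this
      exact this
    have btest : a.toNat.testBit i.toNat = false := by
      by_contra hcon
      exact ((pvBandB_ne a i ha0).mpr (by simpa using hcon)) hband
    have hMcast : M = ((a.toNat ||| 2 ^ i.toNat : Nat) : Int) := by
      rw [hMeq, pvBorB_cast a i ha0]
    have hMnn : (0:Int) ≤ M := by rw [hMcast]; exact Int.natCast_nonneg _
    have hMget : M.toNat = a.toNat ||| 2 ^ i.toNat := by
      rw [hMcast]; simp
    have htbM : M.toNat.testBit i.toNat = true := by
      rw [hMget]; simp [Nat.testBit_or, Nat.testBit_two_pow]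
    have hMgt : a < M := by
      have h1 : a.toNat < a.toNat ||| 2 ^ i.toNat := pvOrGt _ _ btest
      have h2 : ((a.toNat : Nat) : Int) = a := Int.toNat_of_nonneg ha0
      rw [hMcast]; omega
    have hM1 : M ≠ 1 := by omega
    have hpred : PySem.Int.bxor M (pvBit i) = a := by
      rw [pvBxorB_cast M i hMnn, hMget, pvOrXor _ _ btest, Int.toNat_of_nonneg ha0]
    show pvEntry n b (a + 1) M v = pvEntry n b a a l ++ [v]
    rw [pvEntry_ne_one n b (a + 1) M v hM1]
    have hsplit : PySem.List.pyRange 0 (n - 1) =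
        PySem.List.pyRange 0 i ++ PySem.List.pyRange i (n - 1) :=
      PySem.List.pyRange_one_append 0 i (n - 1) (by omega) (by omega)
    have hcons : PySem.List.pyRange i (n - 1) = i :: PySem.List.pyRange (i + 1) (n - 1) :=
      PySem.List.pyRange_one_cons (by omega)
    have hleft : (PySem.List.pyRange 0 i).find? (fun i' => pvValidC n b M v i' &&
        decide (PySem.Int.bxor M (pvBit i') < a + 1)) = none := by
      rw [List.find?_eq_none]
      intro i' hmem'
      rw [PySem.List.mem_pyRange_one] at hmem'
      obtain ⟨hi'0, hi'lt⟩ := hmem'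
      by_cases hband' : PySem.Int.band M (pvBit i') ≠ 0
      · have htb' : M.toNat.testBit i'.toNat = true := (pvBandB_ne M i' hMnn).mp hband'
        have hklt : i'.toNat < i.toNat := by omega
        have hxx : M.toNat ^^^ 2 ^ i.toNat < M.toNat ^^^ 2 ^ i'.toNat :=
          pvXorLtXor M.toNat i.toNat i'.toNat htbM htb' hklt
        have hpred' : PySem.Int.bxor M (pvBit i') = ((M.toNat ^^^ 2 ^ i'.toNat : Nat) : Int) :=
          pvBxorB_cast M i' hMnn
        have hagt : a < PySem.Int.bxor M (pvBit i') := by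
          have : ((M.toNat ^^^ 2 ^ i.toNat : Nat) : Int) = a := by
            rw [← pvBxorB_cast M i hMnn, hpred]
          rw [hpred']
          omega
        have : decide (PySem.Int.bxor M (pvBit i') < a + 1) = false := by
          apply decide_eq_false; omega
        simp [this]
        exact fun _ => hagt
      · unfold pvValidC
        rw [not_not.mp hband']
        simp
    have hq_i : (pvValidC n b M v i &&
        decide (PySem.Int.bxor M (pvBit i) < a + 1)) = true := by
      have hvc : pvValidC n b M v i = true := by
        unfold pvValidC
        have h1 : decide (PySem.Int.band M (pvBit i) ≠ 0) = true :=
          decide_eq_true ((pvBandB_ne M i hMnn).mpr htbM)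
        have hfl : PySem.Int.floordiv (PySem.List.pyGetD b i 0) v = l := by
          rw [← hbi, PySem.Int.floordiv_eq_ediv_of_pos (by omega : (0:Int) < v)]
          rw [mul_comm, Int.mul_ediv_cancel_left l (by omega)]
        have h2 : pvOkB b v i = true := by
          unfold pvOkB
          apply decide_eq_true
          refine ⟨hcond.1, ?_, ?_, ?_⟩
          · rw [PySem.Int.mod_eq_zero_iff_dvd]
            exact ⟨l, by rw [← hbi, mul_comm]⟩
          · rw [hfl]; omega
          · rw [hfl]; omega
        have h3 : pvReachC n b (PySem.Int.bxor M (pvBit i))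
            (PySem.Int.floordiv (PySem.List.pyGetD b i 0) v) = true := by
          rw [hpred, hfl]
          rw [pvEntryF_reach n b a l ha0]
          rw [← pvEntry_settled n b a a l ha0 le_rfl]
          exact hent
        rw [h1, h2, h3]
        rfl
      rw [hvc, decide_eq_true (by omega : PySem.Int.bxor M (pvBit i) < a + 1)]
      rfl
    rw [hsplit, List.find?_append, hleft, Option.none_or, hcons,
      List.find?_cons_of_pos (p := fun i' => pvValidC n b M v i' &&
        decide (PySem.Int.bxor M (pvBit i') < a + 1)) hq_i]
    have hfl : PySem.Int.floordiv (PySem.List.pyGetD b i 0) v = l := by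
      rw [← hbi, PySem.Int.floordiv_eq_ediv_of_pos (by omega : (0:Int) < v)]
      rw [mul_comm, Int.mul_ediv_cancel_left l (by omega)]
    show pvPathC n b (PySem.Int.bxor M (pvBit i)) (PySem.Int.floordiv (PySem.List.pyGetD b i 0) v) ++ [v] = _
    rw [hpred, hfl]
    rw [pvEntryF_path n b a l ha0 (by
      rw [pvEntryF_reach n b a l ha0, ← pvEntry_settled n b a a l ha0 le_rfl]
      exact hent)]
    rw [pvEntry_settled n b a a l ha0 le_rfl]
  | none =>
    have hnone := List.find?_eq_none.mp hf
    show pvEntry n b (a + 1) M v = pvEntry n b a M v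
    by_cases hM1 : M = 1
    · rw [hM1, pvEntry_one n b (a + 1) v, pvEntry_one n b a v]
    · rw [pvEntry_ne_one n b (a + 1) M v hM1, pvEntry_ne_one n b a M v hM1]
      have hfc : (PySem.List.pyRange 0 (n - 1)).find? (fun i => pvValidC n b M v i &&
          decide (PySem.Int.bxor M (pvBit i) < a + 1)) =
          (PySem.List.pyRange 0 (n - 1)).find? (fun i => pvValidC n b M v i &&
          decide (PySem.Int.bxor M (pvBit i) < a)) := by
        apply pvFind_congr
        intro i hi
        rw [PySem.List.mem_pyRange_one] at hi
        obtain ⟨hi0, hin⟩ := hi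
        by_cases hband : PySem.Int.band M (pvBit i) ≠ 0
        · have htbM : M.toNat.testBit i.toNat = true := (pvBandB_ne M i hM).mp hband
          have hpredc : PySem.Int.bxor M (pvBit i) = ((M.toNat ^^^ 2 ^ i.toNat : Nat) : Int) :=
            pvBxorB_cast M i hM
          by_cases hpa : PySem.Int.bxor M (pvBit i) = a
          · have hvf : pvValidC n b M v i = false := by
              cases hval : pvValidC n b M v i with
              | false => rfl
              | true =>
                exfalso
                unfold pvValidC at hval
                have hval' := (Bool.and_eq_true _ _).mp hval
                have hok := of_decide_eq_true ((Bool.and_eq_true _ _).mp hval'.1).2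
                obtain ⟨hbi_pos, hmodv, hfd1, hfd2⟩ := hok
                set l := PySem.Int.floordiv (PySem.List.pyGetD b i 0) v with hldef
                have hreach : pvReachC n b a l = true := by
                  have := hval'.2
                  rw [hpa] at this
                  exact this
                have hbiv : v * l = PySem.List.pyGetD b i 0 :=
                  (pvQuot_bounds v (PySem.List.pyGetD b i 0) (by omega) hbi_pos hmodv).2
                have hatest : a.toNat = M.toNat ^^^ 2 ^ i.toNat := by
                  have := hpa.symm
                  rw [hpredc] at this
                  omega
                have hta : a.toNat.testBit i.toNat = false := by
                  rw [hatest, pvXorTestBit, htbM]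
                  rfl
                have hMor : M = PySem.Int.bor a (pvBit i) := by
                  rw [pvBorB_cast a i ha0, hatest, pvXorOr _ _ htbM,
                    Int.toNat_of_nonneg hM]
                apply hnone l (by rw [PySem.List.mem_pyRange_one]; omega)
                have hentl : pvEntry n b a a l ≠ [] := by
                  rw [pvEntry_settled n b a a l ha0 le_rfl]
                  rw [← pvEntryF_reach n b a l ha0]
                  exact hreach
                rw [Bool.and_eq_true]
                refine ⟨decide_eq_true hentl, ?_⟩
                rw [List.any_eq_true]
                refine ⟨i, by rw [PySem.List.mem_pyRange_one]; omega, ?_⟩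
                unfold pvHitB
                have hb1 : (PySem.Int.band a (pvBit i) == 0) = true := by
                  rw [beq_iff_eq]
                  by_contra hcon
                  exact absurd ((pvBandB_ne a i ha0).mp hcon) (by rw [hta]; simp)
                have hfdl : PySem.Int.floordiv (PySem.List.pyGetD b i 0) l = v := by
                  rw [← hbiv, PySem.Int.floordiv_eq_ediv_of_pos (by omega : (0:Int) < l),
                    Int.mul_ediv_cancel v (by omega)]
                have hc : (PySem.List.pyGetD b i 0 > 0 ∧
                    PySem.Int.mod (PySem.List.pyGetD b i 0) l = 0 ∧
                    PySem.Int.floordiv (PySem.List.pyGetD b i 0) l ≤ 100) := by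
                  refine ⟨hbi_pos, ?_, by rw [hfdl]; omega⟩
                  rw [PySem.Int.mod_eq_zero_iff_dvd]
                  exact ⟨v, by rw [← hbiv, mul_comm]⟩
                rw [hb1, decide_eq_true hc, beq_iff_eq.mpr hMor, beq_iff_eq.mpr hfdl]
                rfl
            rw [hvf]
            simp
          · have : (PySem.Int.bxor M (pvBit i) < a + 1) ↔
                (PySem.Int.bxor M (pvBit i) < a) := by omega
            rw [decide_eq_decide.mpr this]
        · unfold pvValidC
          rw [not_not.mp hband]
          simp
      rw [hfc]

-- ---- the invariant of the mask fold ----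

def pvInv (n : Int) (b : List Int) (a : Int) (dp : pvDP) : Prop :=
  ∀ M v, 0 ≤ M → 1 ≤ v → v ≤ 100 → pvReadA dp M v = pvEntry n b a M v

theorem pvStepAMask_inv (n : Int) (b : List Int) (a : Int) (dp : pvDP)
    (ha : 1 ≤ a) (h : pvInv n b a dp) : pvInv n b (a + 1) (pvStepAMask n b dp a) := by
  intro M v hM hv1 hv2
  unfold pvStepAMask
  rw [pvFoldLast_read n b a ha (PySem.List.pyRange 1 101) (PySem.List.nodup_pyRange_one 1 101)
    (fun x hx => by rw [PySem.List.mem_pyRange_one] at hx; omega) dp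
    (fun l' h1 h2 => h a l' (by omega) h1 h2) M v hv1 hv2]
  rw [pvEntry_evolve n b a M v ha hM hv1 hv2]
  cases (PySem.List.pyRange 1 101).find? (fun l => decide (pvEntry n b a a l ≠ []) &&
      (PySem.List.pyRange 0 (n - 1)).any (pvHitB b a l M v)) with
  | some l => rfl
  | none => exact h M v hM hv1 hv2

theorem pvFoldMask_inv (n : Int) (b : List Int) (T : Int) :
    ∀ (k : Nat) (a : Int) (dp : pvDP), 1 ≤ a → a ≤ T → ((T - a).toNat ≤ k) →
      pvInv n b a dp →
      pvInv n b T ((PySem.List.pyRange a T).foldl (pvStepAMask n b) dp) := by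
  intro k
  induction k with
  | zero =>
    intro a dp h1 h2 hk hI
    have hae : a = T := by omega
    rw [PySem.List.pyRange_one_eq_nil (by omega)]
    subst hae
    exact hI
  | succ k ih =>
    intro a dp h1 h2 hk hI
    by_cases hend : a = T
    · rw [PySem.List.pyRange_one_eq_nil (by omega)]
      subst hend
      exact hI
    · rw [PySem.List.pyRange_one_cons (by omega)]
      simp only [List.foldl_cons]
      exact ih (a + 1) _ (by omega) (by omega) (by omega) (pvStepAMask_inv n b a dp h1 hI)

theorem pvReachC_zero (n : Int) (b : List Int) (q : Int) : pvReachC n b 0 q = false := by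
  rw [pvReachC_eq n b 0 q le_rfl, if_neg (by norm_num)]
  rw [List.any_eq_false]
  intro i _
  unfold pvValidC
  have hz : PySem.Int.band 0 (pvBit i) = 0 := by
    rw [PySem.Int.band_comm]
    simp
  rw [hz]
  simp

theorem pvReadA_empty (M v : Int) : pvReadA PySem.Dict.empty M v = [] := by
  simp [pvReadA, PySem.Dict.getD_empty]

theorem pvBaseFold_read (b : List Int) :
    ∀ (L : List Int) (dp : pvDP) (M v : Int),
      pvReadA (L.foldl (fun dp a1 =>
        if (PySem.List.pyRange 1 101).any (fun a2 => a1 * a2 == PySem.List.pyGetD b 0 0) then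
          pvWriteA dp 1 a1 [a1]
        else dp) dp) M v =
      if M = 1 ∧ v ∈ L ∧
          ((PySem.List.pyRange 1 101).any (fun a2 => v * a2 == PySem.List.pyGetD b 0 0) = true) then
        [v]
      else pvReadA dp M v := by
  intro L
  induction L with
  | nil => intro dp M v; simp
  | cons a1 L ih =>
    intro dp M v
    simp only [List.foldl_cons]
    rw [ih]
    by_cases hC : M = 1 ∧ v ∈ L ∧
        ((PySem.List.pyRange 1 101).any (fun a2 => v * a2 == PySem.List.pyGetD b 0 0) = true)
    · rw [if_pos hC, if_pos ⟨hC.1, by simp [hC.2.1], hC.2.2⟩]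
    · rw [if_neg hC]
      by_cases hD : M = 1 ∧ v = a1 ∧
          ((PySem.List.pyRange 1 101).any (fun a2 => v * a2 == PySem.List.pyGetD b 0 0) = true)
      · obtain ⟨hD1, hD2, hD3⟩ := hD
        have hscan1 : ((PySem.List.pyRange 1 101).any
            (fun a2 => a1 * a2 == PySem.List.pyGetD b 0 0)) = true := by
          rw [← hD2]; exact hD3
        have houter : M = 1 ∧ v ∈ a1 :: L ∧
            ((PySem.List.pyRange 1 101).any
              (fun a2 => v * a2 == PySem.List.pyGetD b 0 0) = true) :=
          ⟨hD1, by simp [hD2], hD3⟩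
        rw [if_pos houter, if_pos hscan1, pvReadA_write, if_pos ⟨hD1, hD2⟩, hD2]
      · have houtneg : ¬(M = 1 ∧ v ∈ a1 :: L ∧
            ((PySem.List.pyRange 1 101).any
              (fun a2 => v * a2 == PySem.List.pyGetD b 0 0) = true)) := by
          intro hc
          obtain ⟨h1, h2, h3⟩ := hc
          rcases List.mem_cons.mp h2 with he | hm
          · exact hD ⟨h1, he, h3⟩
          · exact hC ⟨h1, hm, h3⟩
        rcases Bool.eq_false_or_eq_true ((PySem.List.pyRange 1 101).any
            (fun a2 => a1 * a2 == PySem.List.pyGetD b 0 0)) with hscan | hscan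
        · rw [if_pos hscan, pvReadA_write]
          rw [if_neg (show ¬(M = 1 ∧ v = a1) from fun hc =>
            hD ⟨hc.1, hc.2, by rw [hc.2]; exact hscan⟩)]
          rw [if_neg houtneg]
        · rw [if_neg (show ¬(((PySem.List.pyRange 1 101).any
              (fun a2 => a1 * a2 == PySem.List.pyGetD b 0 0)) = true) by simp [hscan])]
          rw [if_neg houtneg]

theorem pvBase_inv (n : Int) (b : List Int) :
    pvInv n b 1 ((PySem.List.pyRange 1 101).foldl (fun dp a1 =>
      if (PySem.List.pyRange 1 101).any (fun a2 => a1 * a2 == PySem.List.pyGetD b 0 0) then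
        pvWriteA dp 1 a1 [a1]
      else dp) PySem.Dict.empty) := by
  intro M v hM hv1 hv2
  rw [pvBaseFold_read b (PySem.List.pyRange 1 101) PySem.Dict.empty M v, pvReadA_empty]
  by_cases hM1 : M = 1
  · rw [hM1, pvEntry_one n b 1 v]
    have hmem : v ∈ PySem.List.pyRange 1 101 := by rw [PySem.List.mem_pyRange_one]; omega
    have hiff : ((PySem.List.pyRange 1 101).any
        (fun a2 => v * a2 == PySem.List.pyGetD b 0 0) = true) ↔ pvBaseB b v = true := by
      rw [pvAny_eq v (PySem.List.pyGetD b 0 0) hv1]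
      unfold pvBaseB
      rw [decide_eq_true_eq]
    by_cases hB : pvBaseB b v = true
    · rw [if_pos hB, if_pos ⟨rfl, hmem, hiff.mpr hB⟩]
    · rw [if_neg hB, if_neg (by intro hc; exact hB (hiff.mp hc.2.2))]
  · rw [if_neg (by intro hc; exact hM1 hc.1)]
    rw [pvEntry_ne_one n b 1 M v hM1]
    have hfnone : (PySem.List.pyRange 0 (n - 1)).find? (fun i =>
        pvValidC n b M v i && decide (PySem.Int.bxor M (pvBit i) < 1)) = none := by
      rw [List.find?_eq_none]
      intro i _
      by_cases hband : PySem.Int.band M (pvBit i) ≠ 0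
      · have hx := pvBxorB_cast M i hM
        have hnn : (0:Int) ≤ PySem.Int.bxor M (pvBit i) := by
          rw [hx]; exact Int.natCast_nonneg _
        by_cases hp0 : PySem.Int.bxor M (pvBit i) < 1
        · have hz : PySem.Int.bxor M (pvBit i) = 0 := by omega
          have hvf : pvValidC n b M v i = false := by
            unfold pvValidC
            rw [hz, pvReachC_zero]
            simp
          rw [hvf]
          simp
        · rw [decide_eq_false hp0]
          simp
      · have hvf : pvValidC n b M v i = false := by
          unfold pvValidC
          rw [not_not.mp hband]
          simp
        rw [hvf]
        simp
    rw [hfnone]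

-- ===== VERDICT (by name: the statement is the Claim_ definition above) =====
theorem reconstruct_array_spec : Claim_equal_reconstruct_array := by
  intro n b hdom hpre
  show reconstruct_array n b = reconstruct_array_alt n b
  simp only [reconstruct_array, reconstruct_array_alt]
  have hT1 : (1:Int) ≤ (1 : Int) <<< (n - 1).toNat := by
    rw [pvBit_cast ((n - 1).toNat)]
    exact_mod_cast Nat.one_le_two_pow
  have hInv : pvInv n b ((1 : Int) <<< (n - 1).toNat)
      ((PySem.List.pyRange 1 ((1 : Int) <<< (n - 1).toNat)).foldl (pvStepAMask n b)
        ((PySem.List.pyRange 1 101).foldl (fun dp a1 =>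
          if (PySem.List.pyRange 1 101).any (fun a2 => a1 * a2 == PySem.List.pyGetD b 0 0) then
            pvWriteA dp 1 a1 [a1]
          else dp) PySem.Dict.empty)) :=
    pvFoldMask_inv n b _ (((1 : Int) <<< (n - 1).toNat - 1).toNat) 1 _ le_rfl hT1 le_rfl
      (pvBase_inv n b)
  have hfull0 : (0:Int) ≤ (1 : Int) <<< (n - 1).toNat - 1 := by omega
  have hread : ∀ v, 1 ≤ v → v ≤ 100 →
      pvReadA ((PySem.List.pyRange 1 ((1 : Int) <<< (n - 1).toNat)).foldl (pvStepAMask n b)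
        ((PySem.List.pyRange 1 101).foldl (fun dp a1 =>
          if (PySem.List.pyRange 1 101).any (fun a2 => a1 * a2 == PySem.List.pyGetD b 0 0) then
            pvWriteA dp 1 a1 [a1]
          else dp) PySem.Dict.empty)) ((1 : Int) <<< (n - 1).toNat - 1) v =
      pvEntryF n b ((1 : Int) <<< (n - 1).toNat - 1) v := by
    intro v h1 h2
    rw [hInv ((1 : Int) <<< (n - 1).toNat - 1) v hfull0 h1 h2]
    exact pvEntry_settled n b ((1 : Int) <<< (n - 1).toNat)
      ((1 : Int) <<< (n - 1).toNat - 1) v hfull0 (by omega)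
  have hpt : ∀ v ∈ PySem.List.pyRange 1 101,
      (decide (pvReadA ((PySem.List.pyRange 1 ((1 : Int) <<< (n - 1).toNat)).foldl
          (pvStepAMask n b)
          ((PySem.List.pyRange 1 101).foldl (fun dp a1 =>
            if (PySem.List.pyRange 1 101).any (fun a2 => a1 * a2 == PySem.List.pyGetD b 0 0) then
              pvWriteA dp 1 a1 [a1]
            else dp) PySem.Dict.empty)) ((1 : Int) <<< (n - 1).toNat - 1) v ≠ [])) =
      pvReachB n b (((1 : Int) <<< (n - 1).toNat - 1).toNat + 1)
        ((1 : Int) <<< (n - 1).toNat - 1) v := by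
    intro v hv
    rw [PySem.List.mem_pyRange_one] at hv
    rw [hread v hv.1 (by omega)]
    show _ = pvReachC n b ((1 : Int) <<< (n - 1).toNat - 1) v
    rcases Bool.eq_false_or_eq_true (pvReachC n b ((1 : Int) <<< (n - 1).toNat - 1) v)
      with hr | hr
    · rw [hr]
      exact decide_eq_true
        ((pvEntryF_reach n b ((1 : Int) <<< (n - 1).toNat - 1) v hfull0).mp hr)
    · rw [hr]
      apply decide_eq_false
      intro hne
      exact absurd ((pvEntryF_reach n b ((1 : Int) <<< (n - 1).toNat - 1) v hfull0).mpr hne)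
        (by rw [hr]; simp)
  rw [pvFind_congr _ _ _ hpt]
  cases hf : (PySem.List.pyRange 1 101).find? (fun v =>
      pvReachB n b (((1 : Int) <<< (n - 1).toNat - 1).toNat + 1)
        ((1 : Int) <<< (n - 1).toNat - 1) v) with
  | none => rfl
  | some v =>
    have hp := List.find?_some hf
    have hmem := List.mem_of_find?_eq_some hf
    rw [PySem.List.mem_pyRange_one] at hmem
    have hrc : pvReachC n b ((1 : Int) <<< (n - 1).toNat - 1) v = true := hp
    dsimp only
    rw [hread v hmem.1 (by omega)]
    rw [← pvEntryF_path n b ((1 : Int) <<< (n - 1).toNat - 1) v hfull0 hrc]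
    rfl
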